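-- pv_equiv track=rewrite | github.com/medford-group/Computational-Study-of-Transition-Metal-Substitutions | scripts/make_si.py | subscipt
-- ===== SOURCE A (Python) =====
-- def subscipt(species):
--     subscripted = ''
--     for i, char in enumerate(species):
--         if i == 0:
--             subscripted += char
--         elif char.isdecimal():
--             subscripted += '$_' + char + '$'
--         elif char == '_':
--             subscripted += ' '
--         else:
--             subscripted += char
--     return subscripted
-- ===== SOURCE B (Python) =====
-- def subscipt(species):
--     tail = species[1:].replace('_', ' ')
--     for d in '0123456789':
--         tail = tail.replace(d, '$_' + d + '$')
--     return species[:1] + tail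
-- ===== Notes on version B (the rewrite author's own statement) =====
-- stated objective: faster
-- what changed: Replaces the indexed per-character branch loop with repeated string concatenation by eleven staged whole-string str.replace passes over the tail ('_'->' ' first, then each decimal digit d -> '$_d$'), prepending the first character verbatim.
import Mathlib
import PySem

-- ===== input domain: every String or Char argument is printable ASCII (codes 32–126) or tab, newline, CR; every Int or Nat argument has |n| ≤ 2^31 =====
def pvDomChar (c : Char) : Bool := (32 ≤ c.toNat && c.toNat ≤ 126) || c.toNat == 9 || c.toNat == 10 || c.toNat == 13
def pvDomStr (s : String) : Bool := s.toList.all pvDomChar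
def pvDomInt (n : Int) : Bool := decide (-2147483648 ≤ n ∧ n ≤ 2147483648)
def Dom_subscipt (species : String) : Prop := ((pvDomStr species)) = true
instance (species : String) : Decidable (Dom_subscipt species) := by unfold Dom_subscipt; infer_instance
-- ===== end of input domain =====

-- B replaces A's indexed per-character branch loop (quadratic string concatenation)
-- by eleven staged whole-string replace passes over the tail ('_' first, then each
-- decimal digit), keeping the first character verbatim (measured faster).

-- ===== PORT A =====
-- literal port: enumerate-loop accumulating the output string character block by block
-- (str.isdecimal is ported by PySem.Chars.isdigit, exact on the ASCII domain)
def subscipt (species : String) : String :=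
  String.mk ((PySem.List.enumerate species.toList 0).foldl
    (fun subscripted p =>
      if p.1 == 0 then subscripted ++ [p.2]
      else if PySem.Chars.isdigit p.2 then subscripted ++ ['$', '_', p.2, '$']
      else if p.2 == '_' then subscripted ++ [' ']
      else subscripted ++ [p.2]) [])

-- ===== PORT B =====
-- tail = species[1:].replace('_',' '); for d in '0123456789': tail = tail.replace(d, '$_'+d+'$');
-- return species[:1] + tail
def subscipt_alt (species : String) : String :=
  String.mk (PySem.List.slice species.toList none (some 1) ++
    "0123456789".toList.foldl (fun t d => PySem.Chars.replace t [d] ['$', '_', d, '$'])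
      (PySem.Chars.replace (PySem.List.slice species.toList (some 1) none) ['_'] [' ']))

-- ===== PRECONDITION & SPEC =====
def Spec_subscipt (species : String) (out : String) : Prop := out = subscipt_alt species
instance (species : String) (out : String) : Decidable (Spec_subscipt species out) := by unfold Spec_subscipt; infer_instance

-- ===== CLAIM (what is proved, stated in full; the proofs are below) =====
def Claim_equal_subscipt : Prop := ∀ (species : String), Dom_subscipt species → Spec_subscipt species (subscipt species)

-- ===== LEMMAS AND PROOFS =====

-- the per-character replacement A implements, as a plain function
def pvRep (c : Char) : List Char :=
  if PySem.Chars.isdigit c then ['$', '_', c, '$']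
  else if c == '_' then [' ']
  else [c]

-- single-character substitution, the effect of one replace pass on one char
def pvSub (a : Char) (rep : List Char) (c : Char) : List Char :=
  if c == a then rep else [c]

theorem pv_char_eq (c d : Char) (h : c.toNat = d.toNat) : c = d :=
  Char.ext (UInt32.toNat_inj.mp h)

-- replace with a single-character pattern is a flatMap of the per-char substitution
theorem pv_replace_go_single (a : Char) (rep : List Char) :
    ∀ (fuel : Nat) (l acc : List Char), l.length ≤ fuel →
    PySem.Chars.replace.go [a] rep fuel l acc
      = acc.reverse ++ l.flatMap (pvSub a rep) := by
  intro fuel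
  induction fuel with
  | zero =>
    intro l acc h
    have : l = [] := List.length_eq_zero_iff.mp (Nat.le_zero.mp h)
    subst this; simp [PySem.Chars.replace.go]
  | succ fuel ih =>
    intro l acc h
    cases l with
    | nil => simp [PySem.Chars.replace.go]
    | cons c t =>
      rw [PySem.Chars.replace.go]
      by_cases hc : c = a
      · subst hc
        have hp : [c].isPrefixOf (c :: t) = true := by simp [List.isPrefixOf]
        rw [if_pos hp]
        simp only [List.length_cons] at h
        have hdrop : List.drop [c].length (c :: t) = t := by simp
        rw [hdrop, ih t (rep.reverse ++ acc) (Nat.le_of_succ_le_succ h)]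
        simp [pvSub]
      · have hp : [a].isPrefixOf (c :: t) = false := by
          simp [List.isPrefixOf, beq_eq_false_iff_ne.mpr (fun e => hc e.symm)]
        rw [if_neg (by simp [hp])]
        simp only [List.length_cons] at h
        rw [ih t (c :: acc) (Nat.le_of_succ_le_succ h)]
        simp [pvSub, beq_eq_false_iff_ne.mpr hc]

theorem pv_replace_single (a : Char) (rep : List Char) (l : List Char) :
    PySem.Chars.replace l [a] rep = l.flatMap (pvSub a rep) := by
  unfold PySem.Chars.replace
  rw [if_neg (by simp)]
  simpa using pv_replace_go_single a rep l.length l [] le_rfl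

-- staged flatMap passes push inside a flatMap base
theorem pv_foldl_passes (ds : List Char) :
    ∀ (g : Char → List Char) (t : List Char),
    ds.foldl (fun l d => l.flatMap (pvSub d ['$', '_', d, '$'])) (t.flatMap g)
      = t.flatMap (fun c => ds.foldl (fun l d => l.flatMap (pvSub d ['$', '_', d, '$'])) (g c)) := by
  induction ds with
  | nil => intro g t; simp
  | cons d ds ih =>
    intro g t
    simp only [List.foldl_cons]
    rw [List.flatMap_assoc, ih (fun c => (g c).flatMap (pvSub d ['$', '_', d, '$'])) t]

theorem pv_digits_list :
    "0123456789".toList = ['0','1','2','3','4','5','6','7','8','9'] := by decide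

-- the combined effect of all eleven passes on one character is A's replacement
set_option maxHeartbeats 1000000 in
theorem pv_passes_eq_rep (c : Char) :
    "0123456789".toList.foldl (fun l d => l.flatMap (pvSub d ['$', '_', d, '$']))
      (pvSub '_' [' '] c) = pvRep c := by
  by_cases e0 : c = '0'; · subst e0; decide
  by_cases e1 : c = '1'; · subst e1; decide
  by_cases e2 : c = '2'; · subst e2; decide
  by_cases e3 : c = '3'; · subst e3; decide
  by_cases e4 : c = '4'; · subst e4; decide
  by_cases e5 : c = '5'; · subst e5; decide
  by_cases e6 : c = '6'; · subst e6; decide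
  by_cases e7 : c = '7'; · subst e7; decide
  by_cases e8 : c = '8'; · subst e8; decide
  by_cases e9 : c = '9'; · subst e9; decide
  have f : ∀ d : Char, c ≠ d → (c == d) = false := fun d h => beq_eq_false_iff_ne.mpr h
  have hd : PySem.Chars.isdigit c = false := by
    cases hdig : PySem.Chars.isdigit c with
    | false => rfl
    | true =>
      exfalso
      simp only [PySem.Chars.isdigit, Bool.and_eq_true, decide_eq_true_eq] at hdig
      obtain ⟨a, b⟩ := hdig
      have hn : 48 ≤ c.toNat ∧ c.toNat ≤ 57 := ⟨a, b⟩
      have g0 : c.toNat ≠ 48 := fun e => e0 (pv_char_eq c '0' (by rw [e]; rfl))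
      have g1 : c.toNat ≠ 49 := fun e => e1 (pv_char_eq c '1' (by rw [e]; rfl))
      have g2 : c.toNat ≠ 50 := fun e => e2 (pv_char_eq c '2' (by rw [e]; rfl))
      have g3 : c.toNat ≠ 51 := fun e => e3 (pv_char_eq c '3' (by rw [e]; rfl))
      have g4 : c.toNat ≠ 52 := fun e => e4 (pv_char_eq c '4' (by rw [e]; rfl))
      have g5 : c.toNat ≠ 53 := fun e => e5 (pv_char_eq c '5' (by rw [e]; rfl))
      have g6 : c.toNat ≠ 54 := fun e => e6 (pv_char_eq c '6' (by rw [e]; rfl))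
      have g7 : c.toNat ≠ 55 := fun e => e7 (pv_char_eq c '7' (by rw [e]; rfl))
      have g8 : c.toNat ≠ 56 := fun e => e8 (pv_char_eq c '8' (by rw [e]; rfl))
      have g9 : c.toNat ≠ 57 := fun e => e9 (pv_char_eq c '9' (by rw [e]; rfl))
      omega
  have hs : ∀ (a : Char) (r : List Char), c ≠ a → pvSub a r c = [c] := by
    intro a r h; simp [pvSub, f a h]
  by_cases eu : c = '_'
  · subst eu; decide
  · rw [pv_digits_list]
    simp only [List.foldl_cons, List.foldl_nil]
    rw [hs _ _ eu]
    simp only [List.flatMap_cons, List.flatMap_nil, List.append_nil,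
      hs _ _ e0, hs _ _ e1, hs _ _ e2, hs _ _ e3, hs _ _ e4,
      hs _ _ e5, hs _ _ e6, hs _ _ e7, hs _ _ e8, hs _ _ e9]
    simp [pvRep, hd, f _ eu]

-- B's combined tail transformation equals flatMap of A's per-char replacement
set_option maxHeartbeats 1000000 in
theorem pvB_tail (t : List Char) :
    "0123456789".toList.foldl (fun l d => PySem.Chars.replace l [d] ['$', '_', d, '$'])
      (PySem.Chars.replace t ['_'] [' ']) = t.flatMap pvRep := by
  rw [pv_replace_single]
  have hbody : (fun (l : List Char) (d : Char) => PySem.Chars.replace l [d] ['$', '_', d, '$'])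
      = fun l d => l.flatMap (pvSub d ['$', '_', d, '$']) := by
    funext l d; exact pv_replace_single d _ l
  rw [hbody, pv_foldl_passes]
  simp only [pv_passes_eq_rep]

-- A's loop body always appends a block: rewrite it to acc ++ g p
theorem pvA_body_eq :
    (fun (subscripted : List Char) (p : Int × Char) =>
      if p.1 == 0 then subscripted ++ [p.2]
      else if PySem.Chars.isdigit p.2 then subscripted ++ ['$', '_', p.2, '$']
      else if p.2 == '_' then subscripted ++ [' ']
      else subscripted ++ [p.2])
    = (fun subscripted p =>
        subscripted ++ (if p.1 == 0 then [p.2] else pvRep p.2)) := by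
  funext acc p
  simp only [pvRep]
  split_ifs <;> rfl

-- over the tail every index is ≥ 1, so the i == 0 branch never fires
theorem pvTail (rest : List Char) (s : Int) (hs : 1 ≤ s) :
    (PySem.List.enumerate rest s).flatMap
      (fun p => if p.1 == 0 then [p.2] else pvRep p.2)
    = rest.flatMap pvRep := by
  induction rest generalizing s with
  | nil => simp [PySem.List.enumerate]
  | cons c rest ih =>
    rw [PySem.List.enumerate_cons]
    simp only [List.flatMap_cons]
    rw [ih (s + 1) (by omega)]
    have : (s == 0) = false := by simp; omega
    simp [this]

-- ===== VERDICT (by name: the statement is the Claim_ definition above) =====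
theorem subscipt_spec : Claim_equal_subscipt := by
  intro species _
  unfold Spec_subscipt subscipt subscipt_alt
  rw [pvA_body_eq, PySem.List.foldl_append_eq_flatMap,
    PySem.List.slice_from species.toList (by norm_num),
    PySem.List.slice_to species.toList (by norm_num), pvB_tail]
  generalize species.toList = l
  cases l with
  | nil => simp
  | cons c rest =>
    rw [PySem.List.enumerate_cons]
    simp only [List.flatMap_cons, List.nil_append]
    rw [pvTail rest (0 + 1) (by omega)]
    simp
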